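-- pv_equiv track=rewrite | github.com/Mesh-254/introductory-test | search_algorithms/two_way_search.py | two_way_string_match
-- ===== SOURCE A (Python) =====
-- def preprocess(pattern: str) -> dict:
--     """
--     Preprocesses the pattern to generate a skip table.
--
--     Args:
--         pattern (str): The pattern to preprocess.
--
--     Returns:
--         dict: A dictionary containing the skip table
--         for characters in the pattern.
--     """
--     skip_table = {}  # Create an empty dictionary for the skip table
--     m = len(pattern)  # Get the length of the pattern
--
--     # Iterate over the characters in the pattern
--     for i in range(m):
--         # Calculate the skip value for the current character and add it to the
--         # skip table
--         skip_table[pattern[i]] = m - i - 1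
--
--     return skip_table  # Return the skip table
--
-- def two_way_string_match(pattern: str, text: str) -> bool:
--     """
--     Performs Two-Way String Matching to find a match of a line in the text.
--
--     Args:
--         pattern (str): The pattern to search for.
--         text (str): The text to search within.
--
--     Returns:
--         bool: True if a match of a line is found in the text, False otherwise.
--     """
--     # Preprocess the pattern to generate the skip table
--     skip_table = preprocess(pattern)
--     pattern_lines = pattern.splitlines()  # Split the pattern into lines
--     text_lines = text.splitlines()  # Split the text into lines
--     m = len(pattern_lines)  # Get the number of lines in the pattern
--     n = len(text_lines)  # Get the number of lines in the text
--
--     # Iterate over the text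
--     for i in range(n - m + 1):
--         # Check if the lines in the text match the lines in the pattern
--         if text_lines[i:i + m] == pattern_lines:
--             return True  # Match found
--
--     return False  # No match found
-- ===== SOURCE B (Python) =====
-- def _starts_with(prefix, lines):
--     """True iff prefix is an elementwise prefix of lines."""
--     if len(prefix) > len(lines):
--         return False
--     for a, b in zip(prefix, lines):
--         if a != b:
--             return False
--     return True
--
-- def two_way_string_match(pattern: str, text: str) -> bool:
--     """Scan the suffixes of the text's line list, checking an elementwise
--     prefix match at each, instead of comparing a fresh slice per index."""
--     pattern_lines = pattern.splitlines()
--     suffix = text.splitlines()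
--     while True:
--         if _starts_with(pattern_lines, suffix):
--             return True
--         if not suffix:
--             return False
--         del suffix[0]
-- ===== Notes on version B (the rewrite author's own statement) =====
-- stated objective: alternative
-- what changed: Replaced A's index loop that materialises a fresh m-line slice at every offset (after building an unused skip table) with a suffix scan: walk the text's line list dropping one line at a time and do an elementwise prefix comparison that stops at the first mismatching line.
import Mathlib
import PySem

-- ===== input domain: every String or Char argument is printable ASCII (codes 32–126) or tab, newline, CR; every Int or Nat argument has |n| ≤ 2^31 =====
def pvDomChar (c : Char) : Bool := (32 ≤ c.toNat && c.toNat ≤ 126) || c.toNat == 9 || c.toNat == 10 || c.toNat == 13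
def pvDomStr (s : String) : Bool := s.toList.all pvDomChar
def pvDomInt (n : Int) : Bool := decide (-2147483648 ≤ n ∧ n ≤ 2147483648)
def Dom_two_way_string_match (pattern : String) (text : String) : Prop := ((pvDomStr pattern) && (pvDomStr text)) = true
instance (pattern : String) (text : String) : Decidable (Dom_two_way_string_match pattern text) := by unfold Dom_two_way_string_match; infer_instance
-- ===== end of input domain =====

-- B replaces A's per-index slice comparison with a suffix scan doing an elementwise
-- prefix check (alternative decomposition, same asymptotic cost); A's unused skip table is not built.


-- ===== PORT A =====
-- A's preprocess: builds the skip table (A computes it but never uses it; kept for fidelity).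
-- pattern[i] with i drawn from range(len(pattern)) is always in range, so the .getD default is never hit.
def preprocess (pattern : String) : PySem.Dict Char Int :=
  let m : Int := PySem.Str.len pattern
  (PySem.List.pyRange 0 m 1).foldl
    (fun d i => d.insert ((PySem.Str.pyGet? pattern i).getD ' ') (m - i - 1))
    PySem.Dict.empty

def two_way_string_match (pattern : String) (text : String) : Bool :=
  let _skip_table := preprocess pattern
  let pattern_lines := PySem.Str.splitlines pattern
  let text_lines := PySem.Str.splitlines text
  let m : Int := pattern_lines.length
  let n : Int := text_lines.length
  -- for i in range(n - m + 1): if text_lines[i:i+m] == pattern_lines: return True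
  (PySem.List.pyRange 0 (n - m + 1) 1).foldl
    (fun found i =>
      if PySem.List.slice text_lines (some i) (some (i + m)) == pattern_lines then true else found)
    false

-- ===== PORT B =====
-- _starts_with: length check, then the zip loop (early 'return False' kept as a Bool accumulator)
def starts_with_b (prefix_ lines : List String) : Bool :=
  if lines.length < prefix_.length then false
  else (prefix_.zip lines).foldl (fun ok ab => if ab.1 != ab.2 then false else ok) true

-- B's while-loop: check a prefix match at the current suffix, else drop one line
def scan_b (pl : List String) : List String → Bool
  | [] => starts_with_b pl []
  | s :: ts => if starts_with_b pl (s :: ts) then true else scan_b pl ts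

def two_way_string_match_alt (pattern : String) (text : String) : Bool :=
  scan_b (PySem.Str.splitlines pattern) (PySem.Str.splitlines text)

-- ===== PRECONDITION & SPEC =====
def Spec_two_way_string_match (pattern : String) (text : String) (out : Bool) : Prop := out = two_way_string_match_alt pattern text
instance (pattern : String) (text : String) (out : Bool) : Decidable (Spec_two_way_string_match pattern text out) := by unfold Spec_two_way_string_match; infer_instance

-- ===== CLAIM (what is proved, stated in full; the proofs are below) =====
def Claim_equal_two_way_string_match : Prop := ∀ (pattern : String) (text : String), Dom_two_way_string_match pattern text → Spec_two_way_string_match pattern text (two_way_string_match pattern text)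

-- ===== LEMMAS AND PROOFS =====

-- the zip loop of _starts_with decides elementwise equality on the zipped prefix
lemma starts_aux (p t : List String) (h : p.length ≤ t.length) :
    (!(p.zip t).any fun ab => ab.1 != ab.2) = decide (p <+: t) := by
  induction p generalizing t with
  | nil => simp
  | cons a ps ih =>
    cases t with
    | nil => simp at h
    | cons b ts =>
      simp only [List.zip_cons_cons, List.any_cons, List.cons_prefix_cons]
      by_cases hab : a = b
      · subst hab
        simp only [List.length_cons] at h
        simp [ih ts (by omega)]
      · simp [bne_iff_ne, hab]

-- _starts_with decides List.IsPrefix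
lemma starts_with_b_eq (p t : List String) : starts_with_b p t = decide (p <+: t) := by
  unfold starts_with_b
  rw [PySem.List.foldl_if_false_eq]
  split_ifs with h
  · have : ¬ p <+: t := fun hp => by have := hp.length_le; omega
    simp [this]
  · simpa using starts_aux p t (by omega)

-- B's suffix scan decides List.IsInfix
lemma scan_b_eq (pl tl : List String) : scan_b pl tl = decide (pl <:+: tl) := by
  induction tl with
  | nil => simp [scan_b, starts_with_b_eq]
  | cons s ts ih =>
    simp only [scan_b, starts_with_b_eq, ih]
    by_cases h : pl <+: s :: ts
    · simp [h, h.isInfix]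
    · simp [h, List.infix_cons_iff]

-- A's indexed slice-comparison loop also decides List.IsInfix
lemma a_loop_eq (pl tl : List String) :
    ((PySem.List.pyRange 0 ((tl.length : Int) - (pl.length : Int) + 1) 1).foldl
      (fun found i =>
        if PySem.List.slice tl (some i) (some (i + (pl.length : Int))) == pl then true else found)
      false) = decide (pl <:+: tl) := by
  rw [PySem.List.foldl_if_true_eq]
  rw [PySem.List.pyRange_one]
  simp only [Bool.false_or, List.any_map, Function.comp_def, zero_add, Int.sub_zero]
  rw [Bool.eq_iff_iff]
  simp only [List.any_eq_true, List.mem_range, decide_eq_true_eq]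
  constructor
  · rintro ⟨k, hk, hEq⟩
    rw [PySem.List.slice_natCast_add, beq_iff_eq] at hEq
    have hpre : pl <+: tl.drop k := by
      rw [List.prefix_iff_eq_take]; exact hEq.symm
    exact hpre.isInfix.trans (tl.drop_suffix k).isInfix
  · rintro ⟨s, t', rfl⟩
    refine ⟨s.length, ?_, ?_⟩
    · simp only [List.length_append]
      omega
    · rw [PySem.List.slice_natCast_add, List.append_assoc, List.drop_left, List.take_left,
        beq_iff_eq]

-- ===== VERDICT (by name: the statement is the Claim_ definition above) =====
theorem two_way_string_match_spec : Claim_equal_two_way_string_match := by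
  intro pattern text _
  unfold Spec_two_way_string_match two_way_string_match two_way_string_match_alt
  rw [a_loop_eq, scan_b_eq]
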